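-- pv_equiv track=rewrite | github.com/cliffpham/algos_dataStructures | algos/greedy/course_schedule_III.py | solve
-- ===== SOURCE A (Python) =====
-- import heapq
--
-- def solve(courses):
--     # sort courses by shortest deadline
--     courses.sort(key=lambda x:x[1])
--     pq = [] # courses to take
--     accum = 0
--
--     heapq.heappush(pq,0)
--     for t,d in courses:
--
--         # if a course duration + the minimum course duration is less than 0
--         # the new course is now the first course to take
--         # have the accumaltor and pq reflect the change
--         if accum+t>d:
--             if t+pq[0]<0:
--                 accum+=t+pq[0]
--                 heapq.heappushpop(pq,-t)
--
--         # if the accum + current course duration is less than deadline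
--         # greedily add to courses to take
--         # have pq reflect change
--         else:
--             accum+=t
--             heapq.heappush(pq,-t)
--
--     # -1 since we set course to take intially to 0
--     return len(pq)-1
-- ===== SOURCE B (Python) =====
-- def solve(courses):
--     # Same in-place sort by deadline as A; equivalence is about the return value
--     # (both implementations mutate `courses` identically).
--     courses.sort(key=lambda x: x[1])
--     chosen = [0]  # durations of the taken courses, seeded with the zero course
--     accum = 0
--     for t, d in courses:
--         if accum + t <= d:
--             chosen.append(t)
--             accum += t
--         else:
--             m = max(chosen)
--             if t < m:
--                 chosen.remove(m)
--                 chosen.append(t)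
--                 accum += t - m
--     return len(chosen) - 1
-- ===== Notes on version B (the rewrite author's own statement) =====
-- stated objective: simpler
-- what changed: B drops the heapq priority queue of negated durations and instead keeps the chosen durations in a plain list, replacing the worst (maximum-duration) course via max()/remove() when a course does not fit; same greedy decisions, no heap and no sign-flipping trick.
import Mathlib
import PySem

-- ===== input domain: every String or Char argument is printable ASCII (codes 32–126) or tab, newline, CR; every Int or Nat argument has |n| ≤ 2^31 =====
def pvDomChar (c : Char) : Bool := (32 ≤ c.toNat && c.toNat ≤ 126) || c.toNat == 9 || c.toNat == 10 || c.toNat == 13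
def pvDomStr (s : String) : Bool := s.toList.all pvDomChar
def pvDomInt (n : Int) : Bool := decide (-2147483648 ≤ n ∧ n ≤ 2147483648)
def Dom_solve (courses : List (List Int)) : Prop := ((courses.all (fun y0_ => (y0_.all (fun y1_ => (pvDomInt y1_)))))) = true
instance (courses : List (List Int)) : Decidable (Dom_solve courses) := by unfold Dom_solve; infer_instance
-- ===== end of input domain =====

-- B replaces A's heapq priority queue (of negated durations, plus the 0 sentinel) by a plain
-- unsorted list of the chosen durations maintained with max/remove — simpler, no negation trick.
-- Both A and B sort `courses` in place by deadline (identical mutation); the equivalence proved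
-- here is about the return value.

-- ===== PORT A =====
-- heapq is modelled exactly as a min-priority queue: the heap's contents kept as an ascending
-- sorted list.  pq[0] is the head (CPython: the minimum), heappush inserts keeping order
-- (same contents and same minimum as CPython's sift-up), heappushpop pushes and then removes the
-- minimum (A discards its return value).  Every observation A makes of the heap (pq[0], len(pq),
-- final size) agrees with CPython's heapq on the same operation sequence.
def heappush (h : List Int) (x : Int) : List Int := h.orderedInsert (· ≤ ·) x
def heappushpop (h : List Int) (x : Int) : List Int := (h.orderedInsert (· ≤ ·) x).tail

def stepA (st : List Int × Int) (c : List Int) : List Int × Int :=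
  match c with
  | [t, d] =>
    if st.2 + t > d then
      if t + st.1.headI < 0 then (heappushpop st.1 (-t), st.2 + (t + st.1.headI))
      else st
    else (heappush st.1 (-t), st.2 + t)
  | _ => st  -- a row that is not [t, d] raises in Python (unpack/sort); excluded by Pre_solve

def solve (courses : List (List Int)) : Int :=
  let cs := PySem.List.sorted courses (fun x => PySem.List.pyGetD x 1 0) false
  let s := cs.foldl stepA (heappush [] 0, 0)
  (s.1.length : Int) - 1

-- ===== PORT B =====
def stepB (st : List Int × Int) (c : List Int) : List Int × Int :=
  match c with
  | [t, d] =>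
    if st.2 + t ≤ d then (st.1 ++ [t], st.2 + t)
    else
      let m := (PySem.List.max? st.1 (fun y => y)).getD 0
      if t < m then ((PySem.List.remove? st.1 m).getD st.1 ++ [t], st.2 + (t - m))
      else st
  | _ => st  -- same raising rows, excluded by Pre_solve

def solve_alt (courses : List (List Int)) : Int :=
  let cs := PySem.List.sorted courses (fun x => PySem.List.pyGetD x 1 0) false
  let s := cs.foldl stepB ([0], 0)
  (s.1.length : Int) - 1

-- ===== PRECONDITION & SPEC =====
-- Pre_ excludes exactly the inputs where the Python raises: a row that is not a pair makes
-- `for t,d in courses` (or the sort key x[1]) raise in BOTH A and B.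
def Pre_solve (courses : List (List Int)) : Prop := ∀ c ∈ courses, c.length = 2
instance (courses : List (List Int)) : Decidable (Pre_solve courses) := by unfold Pre_solve; infer_instance
def pvWitness_solve : List (List Int) := [[5, 5], [4, 6], [2, 3]]

def Spec_solve (courses : List (List Int)) (out : Int) : Prop := out = solve_alt courses
instance (courses : List (List Int)) (out : Int) : Decidable (Spec_solve courses out) := by unfold Spec_solve; infer_instance

-- ===== CLAIM (what is proved, stated in full; the proofs are below) =====
def Claim_equal_solve : Prop := ∀ (courses : List (List Int)), Dom_solve courses → Pre_solve courses → Spec_solve courses (solve courses)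

-- ===== LEMMAS AND PROOFS =====

/-- The simulation relation between A's state (heap of negated durations incl. the 0 sentinel,
accumulator) and B's state (plain list of chosen durations incl. the 0 sentinel, accumulator). -/
def SimRel (a b : List Int × Int) : Prop :=
  a.1.Pairwise (· ≤ ·) ∧ a.1.Perm (b.1.map (fun x => -x)) ∧ b.1 ≠ [] ∧ a.2 = b.2

theorem max_spec (chosen : List Int) (hne : chosen ≠ []) :
    ∃ m, PySem.List.max? chosen (fun y => y) = some m ∧ m ∈ chosen ∧ ∀ y ∈ chosen, y ≤ m := by
  cases hm : PySem.List.max? chosen (fun y => y) with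
  | none => exact absurd ((PySem.List.max?_eq_none_iff _ _).mp hm) hne
  | some m =>
    exact ⟨m, rfl, PySem.List.max?_mem hm, fun y hy => PySem.List.max?_isMax hm y hy⟩

theorem headI_eq_neg (pq chosen : List Int) (m : Int)
    (hs : pq.Pairwise (· ≤ ·)) (hp : pq.Perm (chosen.map (fun x => -x)))
    (hmem : m ∈ chosen) (hmax : ∀ y ∈ chosen, y ≤ m) :
    pq.headI = -m := by
  cases pq with
  | nil =>
    have hlen := hp.length_eq
    simp only [List.length_nil, List.length_map] at hlen
    rw [List.eq_nil_of_length_eq_zero hlen.symm] at hmem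
    simp at hmem
  | cons h0 rest =>
    have hmm : -m ∈ h0 :: rest := hp.mem_iff.mpr (List.mem_map_of_mem hmem)
    have h1 : h0 ≤ -m := by
      rcases List.mem_cons.mp hmm with h | h
      · omega
      · exact List.rel_of_pairwise_cons hs h
    have h2 : -m ≤ h0 := by
      have : h0 ∈ (chosen.map (fun x => -x)) := hp.mem_iff.mp (by simp)
      obtain ⟨u, hu, rfl⟩ := List.mem_map.mp this
      have := hmax u hu
      omega
    simp only [List.headI]
    omega

theorem rel_step (a b : List Int × Int) (c : List Int) (h : SimRel a b) :
    SimRel (stepA a c) (stepB b c) := by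
  obtain ⟨hs, hp, hne, hacc⟩ := h
  match c with
  | [] => exact ⟨hs, hp, hne, hacc⟩
  | [_] => exact ⟨hs, hp, hne, hacc⟩
  | (_ :: _ :: _ :: _) => exact ⟨hs, hp, hne, hacc⟩
  | [t, d] =>
    obtain ⟨m, hm, hmem, hmax⟩ := max_spec b.1 hne
    have hh : a.1.headI = -m := headI_eq_neg a.1 b.1 m hs hp hmem hmax
    simp only [stepA, stepB, hm, Option.getD_some]
    by_cases hle : b.2 + t ≤ d
    · rw [if_neg (by omega), if_pos hle]
      have hp1 : (List.orderedInsert (· ≤ ·) (-t) a.1).Perm ((b.1 ++ [t]).map (fun x => -x)) := by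
        refine (List.perm_orderedInsert _ _ _).trans ?_
        refine (hp.cons (-t)).trans ?_
        simpa using (List.perm_append_singleton (-t) (b.1.map (fun x => -x))).symm
      exact ⟨List.Pairwise.orderedInsert _ _ hs, hp1, by simp, by omega⟩
    · rw [hacc, if_pos (by omega), if_neg hle]
      by_cases hlt : t < m
      · rw [if_pos (by rw [hh]; omega), if_pos hlt]
        rw [PySem.List.remove?_eq_some_erase _ m hmem, Option.getD_some]
        cases ha : a.1 with
        | nil =>
          have hlen := hp.length_eq
          rw [ha] at hlen
          simp only [List.length_nil, List.length_map] at hlen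
          rw [List.eq_nil_of_length_eq_zero hlen.symm] at hmem
          simp at hmem
        | cons h0 rest =>
          have hh0 : h0 = -m := by rw [ha] at hh; simpa using hh
          have hp' : (h0 :: rest).Perm (b.1.map (fun x => -x)) := ha ▸ hp
          have hrest : rest.Perm ((b.1.erase m).map (fun x => -x)) := by
            have h1 := hp'.erase (-m)
            rw [hh0, List.erase_cons_head] at h1
            have h2 : ((b.1.erase m).map (fun x => -x)) = ((b.1.map (fun x => -x)).erase (-m)) := by
              simpa using List.map_erase (f := fun x : Int => -x) neg_injective (a := m) b.1
            rwa [← h2] at h1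
          have hso : List.orderedInsert (· ≤ ·) (-t) (h0 :: rest) =
              h0 :: List.orderedInsert (· ≤ ·) (-t) rest :=
            List.orderedInsert_of_not_le _ rest (by rw [hh0]; omega)
          have hsrt : List.Pairwise (fun x1 x2 => x1 ≤ x2) rest :=
            List.Pairwise.of_cons (ha ▸ hs)
          refine ⟨?_, ?_, by simp, ?_⟩
          · show List.Pairwise _ (heappushpop (h0 :: rest) (-t))
            unfold heappushpop
            rw [hso, List.tail_cons]
            exact List.Pairwise.orderedInsert _ _ hsrt
          · show (heappushpop (h0 :: rest) (-t)).Perm ((b.1.erase m ++ [t]).map (fun x => -x))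
            unfold heappushpop
            rw [hso, List.tail_cons]
            refine (List.perm_orderedInsert _ _ _).trans ?_
            refine (hrest.cons (-t)).trans ?_
            simpa using (List.perm_append_singleton (-t) ((b.1.erase m).map (fun x => -x))).symm
          · show b.2 + (t + (h0 :: rest).headI) = b.2 + (t - m)
            simp only [List.headI_cons, hh0]
            omega
      · rw [if_neg (by rw [hh]; omega), if_neg hlt]
        exact ⟨hs, hp, hne, hacc⟩

theorem rel_foldl (cs : List (List Int)) (a b : List Int × Int) (h : SimRel a b) :
    SimRel (cs.foldl stepA a) (cs.foldl stepB b) := by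
  induction cs generalizing a b with
  | nil => exact h
  | cons c cs ih => exact ih _ _ (rel_step a b c h)

-- ===== VERDICT (by name: the statement is the Claim_ definition above) =====
theorem solve_spec : Claim_equal_solve := by
  intro courses _ _
  unfold Spec_solve solve solve_alt
  have h := rel_foldl (PySem.List.sorted courses (fun x => PySem.List.pyGetD x 1 0) false)
      (heappush [] 0, 0) ([0], 0)
      ⟨by simp [heappush], by simp [heappush], by simp, rfl⟩
  obtain ⟨-, hperm, -, -⟩ := h
  simp only []
  rw [hperm.length_eq, List.length_map]
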